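-- pv_equiv track=rewrite | github.com/veprImperia/articleNormalizer | app/core/docx_manager.py | resolve_block_range
-- ===== SOURCE A (Python) =====
-- def resolve_block_range(key: str, doc_map_raw: dict):
--     start = doc_map_raw.get(key)
--     if start is None:
--         return None
--
--     next_candidates = []
--
--     if key == "abstract_ru":
--         for nxt in ("keywords_ru", "abstract_en", "keywords_en", "reference_block", "body_block"):
--             idx = doc_map_raw.get(nxt)
--             if idx is not None and idx > start:
--                 next_candidates.append(idx)
--
--     elif key == "abstract_en":
--         for nxt in ("keywords_en", "reference_block", "body_block"):
--             idx = doc_map_raw.get(nxt)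
--             if idx is not None and idx > start:
--                 next_candidates.append(idx)
--
--     elif key == "body_block":
--         for nxt in ("reference_block",):
--             idx = doc_map_raw.get(nxt)
--             if idx is not None and idx > start:
--                 next_candidates.append(idx)
--
--     elif key == "reference_block":
--         return (start, None)
--
--     end = min(next_candidates) if next_candidates else None
--     return (start, end)
-- ===== SOURCE B (Python) =====
-- _SUCC = {
--     "abstract_ru": frozenset(("keywords_ru", "abstract_en", "keywords_en", "reference_block", "body_block")),
--     "abstract_en": frozenset(("keywords_en", "reference_block", "body_block")),
--     "body_block": frozenset(("reference_block",)),
-- }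
--
--
-- def resolve_block_range(key: str, doc_map_raw: dict):
--     if key not in doc_map_raw:
--         return None
--     start = doc_map_raw[key]
--     succ = _SUCC.get(key, frozenset())
--     end = min((v for k, v in doc_map_raw.items() if k in succ and v > start),
--               default=None)
--     return (start, end)
-- ===== Notes on version B (the rewrite author's own statement) =====
-- stated objective: alternative
-- what changed: Instead of probing a fixed per-key tuple of successor keys with dict.get, B does one data-driven pass over doc_map_raw.items(), keeping values whose key lies in a constant successor frozenset and exceeds start, and takes min(..., default=None); iteration order differs but min makes it irrelevant.
import Mathlib
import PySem

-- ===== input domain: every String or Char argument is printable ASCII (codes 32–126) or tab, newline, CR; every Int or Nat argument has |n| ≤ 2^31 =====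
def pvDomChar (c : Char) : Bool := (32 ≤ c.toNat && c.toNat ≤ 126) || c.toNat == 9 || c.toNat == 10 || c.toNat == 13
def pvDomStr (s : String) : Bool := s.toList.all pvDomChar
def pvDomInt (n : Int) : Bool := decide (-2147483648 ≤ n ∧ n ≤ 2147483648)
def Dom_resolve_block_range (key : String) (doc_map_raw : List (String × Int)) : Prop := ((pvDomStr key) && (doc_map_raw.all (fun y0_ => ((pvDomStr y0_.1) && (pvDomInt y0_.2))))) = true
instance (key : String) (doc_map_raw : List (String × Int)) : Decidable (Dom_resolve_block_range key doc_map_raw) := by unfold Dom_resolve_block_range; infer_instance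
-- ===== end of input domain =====

-- B replaces A's fixed-tuple key probing with one data-driven scan over the document map's
-- items, filtering by membership in a successor set and taking min; objective: alternative.


-- ===== PORT A =====
-- A's per-branch loop: append doc values that exist and exceed start, in tuple order
def pvCollectA (d : PySem.Dict String Int) (start : Int) (nxts : List String) : List Int :=
  nxts.foldl (fun acc nxt =>
    match d.get? nxt with
    | some idx => if start < idx then acc ++ [idx] else acc
    | none => acc) []

-- A's final line: 'min(next_candidates) if next_candidates else None'
def pvMinOf (c : List Int) : Option Int :=
  if c.isEmpty then none else PySem.List.min? c (fun x => x)

def resolve_block_range (key : String) (doc_map_raw : List (String × Int)) : Option (Int × Option Int) :=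
  match (PySem.Dict.ofList doc_map_raw).get? key with
  | none => none
  | some start =>
    if key = "abstract_ru" then
      some (start, pvMinOf (pvCollectA (PySem.Dict.ofList doc_map_raw) start
        ["keywords_ru", "abstract_en", "keywords_en", "reference_block", "body_block"]))
    else if key = "abstract_en" then
      some (start, pvMinOf (pvCollectA (PySem.Dict.ofList doc_map_raw) start
        ["keywords_en", "reference_block", "body_block"]))
    else if key = "body_block" then
      some (start, pvMinOf (pvCollectA (PySem.Dict.ofList doc_map_raw) start
        ["reference_block"]))
    else if key = "reference_block" then
      some (start, none)
    else
      some (start, none)   -- unrecognized key: next_candidates stays empty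

-- ===== PORT B =====
-- B's constant successor-SET table (_SUCC; each frozenset as a PySem.Set = distinct-element list)
def pvSuccTable : PySem.Dict String (PySem.Set String) :=
  PySem.Dict.ofList
    [("abstract_ru", ["keywords_ru", "abstract_en", "keywords_en", "reference_block", "body_block"]),
     ("abstract_en", ["keywords_en", "reference_block", "body_block"]),
     ("body_block", ["reference_block"])]

-- B: one scan over doc_map_raw.items() filtered by successor-set membership, then min(default=None)
def resolve_block_range_alt (key : String) (doc_map_raw : List (String × Int)) : Option (Int × Option Int) :=
  match (PySem.Dict.ofList doc_map_raw).get? key with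
  | none => none
  | some start =>
    some (start, PySem.List.min?
      (((PySem.Dict.ofList doc_map_raw).items.filter
          (fun p => (pvSuccTable.getD key []).contains p.1 && decide (start < p.2))).map (fun p => p.2))
      (fun x => x))

-- ===== PRECONDITION & SPEC =====
def Spec_resolve_block_range (key : String) (doc_map_raw : List (String × Int)) (out : Option (Int × Option Int)) : Prop := out = resolve_block_range_alt key doc_map_raw
instance (key : String) (doc_map_raw : List (String × Int)) (out : Option (Int × Option Int)) : Decidable (Spec_resolve_block_range key doc_map_raw out) := by unfold Spec_resolve_block_range; infer_instance

-- ===== CLAIM (what is proved, stated in full; the proofs are below) =====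
def Claim_equal_resolve_block_range : Prop := ∀ (key : String) (doc_map_raw : List (String × Int)), Dom_resolve_block_range key doc_map_raw → Spec_resolve_block_range key doc_map_raw (resolve_block_range key doc_map_raw)

-- ===== LEMMAS AND PROOFS =====

-- A's candidate for a single probed key
def pvProbe (d : PySem.Dict String Int) (start : Int) (k : String) : Option Int :=
  match d.get? k with
  | some v => if start < v then some v else none
  | none => none

-- A's append-loop is the filterMap of the probes
lemma pvCollectA_eq_filterMap (d : PySem.Dict String Int) (start : Int) :
    ∀ (L : List String) (acc : List Int),
      L.foldl (fun acc nxt =>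
        match d.get? nxt with
        | some idx => if start < idx then acc ++ [idx] else acc
        | none => acc) acc = acc ++ L.filterMap (pvProbe d start) := by
  intro L
  induction L with
  | nil => intro acc; simp
  | cons k L ih =>
    intro acc
    simp only [List.foldl_cons, List.filterMap_cons]
    cases h : d.get? k with
    | none =>
      have hp : pvProbe d start k = none := by simp [pvProbe, h]
      simp [hp, ih acc]
    | some v =>
      by_cases hlt : start < v
      · have hp : pvProbe d start k = some v := by simp [pvProbe, h, hlt]
        simp [hlt, hp, ih (acc ++ [v])]
      · have hp : pvProbe d start k = none := by simp [pvProbe, h, hlt]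
        simp [hlt, hp, ih acc]

-- min with identity key is permutation-invariant (its fold step is right-commutative)
lemma pvMin?_perm (xs ys : List Int) (h : xs.Perm ys) :
    PySem.List.min? xs (fun x => x) = PySem.List.min? ys (fun x => x) := by
  unfold PySem.List.min?
  refine List.Perm.foldl_eq (rcomm := ?_) h none
  constructor
  intro b a c
  cases b with
  | none =>
    show (if c < a then some c else some a) = (if a < c then some a else some c)
    split_ifs <;> first | rfl | (congr 1; omega)
  | some m =>
    dsimp only
    by_cases h1 : a < m <;> by_cases h2 : c < m
    · rw [if_pos h1, if_pos h2]
      dsimp only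
      split_ifs <;> first | rfl | (congr 1; omega)
    · rw [if_pos h1, if_neg h2]
      dsimp only
      split_ifs <;> first | rfl | (congr 1; omega)
    · rw [if_neg h1, if_pos h2]
      dsimp only
      split_ifs <;> first | rfl | (congr 1; omega)
    · rw [if_neg h1, if_neg h2]
      dsimp only
      split_ifs
      rfl

lemma pvMinOf_eq_min? (xs : List Int) :
    pvMinOf xs = PySem.List.min? xs (fun x => x) := by
  cases xs <;> rfl

-- a filter by a disjunction of disjoint predicates is a permutation of the two filters
lemma pvFilter_or_perm {α : Type} (p q : α → Bool) (xs : List α)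
    (hdisj : ∀ x, ¬(p x = true ∧ q x = true)) :
    (xs.filter (fun x => p x || q x)).Perm (xs.filter p ++ xs.filter q) := by
  induction xs with
  | nil => simp
  | cons a t ih =>
    by_cases hp : p a = true
    · have hq : q a = false := by
        cases hqa : q a
        · rfl
        · exact absurd ⟨hp, hqa⟩ (hdisj a)
      simpa [List.filter_cons, hp, hq] using ih.cons a
    · simp only [Bool.not_eq_true] at hp
      by_cases hq : q a = true
      · have h2 : (a :: (t.filter p ++ t.filter q)).Perm (t.filter p ++ a :: t.filter q) :=
          List.perm_middle.symm
        simpa [List.filter_cons, hp, hq] using (ih.cons a).trans h2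
      · simp only [Bool.not_eq_true] at hq
        simpa [List.filter_cons, hp, hq] using ih

-- with unique keys, filtering the items by one key yields exactly the looked-up pair
lemma pvFilter_single_key (l : List (String × Int)) (hnd : (l.map Prod.fst).Nodup) (k : String) :
    l.filter (fun p => p.1 == k) =
      match (PySem.Dict.mk l).get? k with
      | some v => [(k, v)]
      | none => [] := by
  induction l with
  | nil => rfl
  | cons a t ih =>
    simp only [List.map_cons, List.nodup_cons] at hnd
    rw [List.filter_cons, PySem.Dict.get?_mk_cons]
    by_cases hk : a.1 = k
    · subst hk
      have ht : t.filter (fun p => p.1 == a.1) = [] := by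
        apply List.filter_eq_nil_iff.mpr
        intro p hp
        simp only [beq_iff_eq]
        intro hpk
        exact hnd.1 (hpk ▸ List.mem_map_of_mem hp)
      simp [ht]
    · have : (a.1 == k) = false := by simp [hk]
      simp only [this, Bool.false_eq_true, if_false]
      exact ih hnd.2

-- filtering the items by one key AND the threshold yields A's probe for that key
lemma pvFilter_key_lt (d : PySem.Dict String Int) (hnd : d.keys.Nodup) (start : Int) (k : String) :
    (d.items.filter (fun p => p.1 == k && decide (start < p.2))).map (fun p => p.2) =
      (pvProbe d start k).toList := by
  cases d with
  | mk l =>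
    have hnd' : (l.map Prod.fst).Nodup := hnd
    have hf : l.filter (fun p => (p.1 == k) && decide (start < p.2))
        = (l.filter (fun p => p.1 == k)).filter (fun p => decide (start < p.2)) := by
      rw [List.filter_filter]
      apply List.filter_congr
      intro p _
      exact Bool.and_comm _ _
    show (l.filter _).map _ = _
    rw [hf, pvFilter_single_key l hnd' k]
    unfold pvProbe
    cases h : (PySem.Dict.mk l).get? k with
    | none => rfl
    | some v =>
      by_cases hlt : start < v <;> simp [hlt]

-- B's filtered scan of the items is a permutation of A's probes of the successor list
lemma pvScan_perm_probe (d : PySem.Dict String Int) (hnd : d.keys.Nodup) (start : Int) :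
    ∀ (L : List String), L.Nodup →
      ((d.items.filter (fun p => L.contains p.1 && decide (start < p.2))).map (fun p => p.2)).Perm
        (L.filterMap (pvProbe d start)) := by
  intro L
  induction L with
  | nil => simp
  | cons k L ih =>
    intro hndl
    simp only [List.nodup_cons] at hndl
    have hpred : ∀ p : String × Int,
        ((k :: L).contains p.1 && decide (start < p.2))
          = ((p.1 == k && decide (start < p.2)) || (L.contains p.1 && decide (start < p.2))) := by
      intro p
      rw [List.contains_cons]
      cases (p.1 == k) <;> cases L.contains p.1 <;> cases decide (start < p.2) <;> rfl
    have hdisj : ∀ p : String × Int,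
        ¬((p.1 == k && decide (start < p.2)) = true ∧ (L.contains p.1 && decide (start < p.2)) = true) := by
      intro p ⟨h1, h2⟩
      simp only [Bool.and_eq_true, beq_iff_eq] at h1 h2
      exact hndl.1 (by simpa [h1.1] using (List.contains_iff_mem.mp h2.1))
    have hperm := pvFilter_or_perm _ _ d.items hdisj
    have step1 : ((d.items.filter (fun p => (k :: L).contains p.1 && decide (start < p.2))).map (fun p => p.2)).Perm
        (((d.items.filter (fun p => p.1 == k && decide (start < p.2))).map (fun p => p.2)) ++
         ((d.items.filter (fun p => L.contains p.1 && decide (start < p.2))).map (fun p => p.2))) := by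
      rw [List.filter_congr (fun p _ => hpred p), ← List.map_append]
      exact hperm.map _
    have step2 : (((d.items.filter (fun p => p.1 == k && decide (start < p.2))).map (fun p => p.2)) ++
         ((d.items.filter (fun p => L.contains p.1 && decide (start < p.2))).map (fun p => p.2))).Perm
        ((k :: L).filterMap (pvProbe d start)) := by
      rw [List.filterMap_cons, pvFilter_key_lt d hnd start k]
      cases h : pvProbe d start k with
      | none => simpa using ih hndl.2
      | some v => simpa using (ih hndl.2).cons v
    exact step1.trans step2

-- per successor-list key: A's pvMinOf-of-collect equals B's min?-of-scan
lemma pvMain (d : PySem.Dict String Int) (hnd : d.keys.Nodup) (start : Int)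
    (L : List String) (hL : L.Nodup) :
    PySem.List.min?
      ((d.items.filter (fun p => L.contains p.1 && decide (start < p.2))).map (fun p => p.2))
      (fun x => x) = pvMinOf (pvCollectA d start L) := by
  rw [pvMinOf_eq_min?]
  unfold pvCollectA
  rw [pvCollectA_eq_filterMap d start L []]
  exact pvMin?_perm _ _ (pvScan_perm_probe d hnd start L hL)

lemma pvTable_ru : pvSuccTable.getD "abstract_ru" [] =
    ["keywords_ru", "abstract_en", "keywords_en", "reference_block", "body_block"] := by decide

lemma pvTable_en : pvSuccTable.getD "abstract_en" [] =
    ["keywords_en", "reference_block", "body_block"] := by decide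

lemma pvTable_body : pvSuccTable.getD "body_block" [] = ["reference_block"] := by decide

lemma pvTable_other (key : String) (h1 : key ≠ "abstract_ru") (h2 : key ≠ "abstract_en")
    (h3 : key ≠ "body_block") :
    pvSuccTable.getD key [] = [] := by
  have e : pvSuccTable = PySem.Dict.mk
    [("abstract_ru", ["keywords_ru", "abstract_en", "keywords_en", "reference_block", "body_block"]),
     ("abstract_en", ["keywords_en", "reference_block", "body_block"]),
     ("body_block", (["reference_block"] : List String))] := by decide
  rw [PySem.Dict.getD_eq_get?_getD, e]
  simp [beq_iff_eq, Ne.symm h1, Ne.symm h2, Ne.symm h3, PySem.Dict.get?]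

-- B's 'k in succ' membership is list membership
lemma pvSetContains (s : List String) (x : String) :
    PySem.Set.contains s x = s.contains x := rfl

-- B's scan with the empty successor set selects nothing
lemma pvScan_empty (d : PySem.Dict String Int) (start : Int) :
    PySem.List.min?
      ((d.items.filter (fun p => (List.contains [] p.1) && decide (start < p.2))).map (fun p => p.2))
      (fun x => x) = none := by
  simp [PySem.List.min?]

-- ===== VERDICT (by name: the statement is the Claim_ definition above) =====
theorem resolve_block_range_spec : Claim_equal_resolve_block_range := by
  intro key doc_map_raw _
  unfold Spec_resolve_block_range
  unfold resolve_block_range resolve_block_range_alt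
  have hnd := PySem.Dict.nodup_keys_ofList doc_map_raw
  cases h : (PySem.Dict.ofList doc_map_raw).get? key with
  | none => rfl
  | some start =>
    simp only []
    by_cases h1 : key = "abstract_ru"
    · subst h1
      rw [if_pos rfl, pvTable_ru]
      simp only [pvSetContains]
      rw [pvMain _ hnd start _ (by decide)]
    · rw [if_neg h1]
      by_cases h2 : key = "abstract_en"
      · subst h2
        rw [if_pos rfl, pvTable_en]
        simp only [pvSetContains]
        rw [pvMain _ hnd start _ (by decide)]
      · rw [if_neg h2]
        by_cases h3 : key = "body_block"
        · subst h3
          rw [if_pos rfl, pvTable_body]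
          simp only [pvSetContains]
          rw [pvMain _ hnd start _ (by decide)]
        · rw [if_neg h3, pvTable_other key h1 h2 h3]
          simp only [pvSetContains]
          rw [pvScan_empty]
          by_cases h4 : key = "reference_block"
          · rw [if_pos h4]
          · rw [if_neg h4]
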